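-- pv_equiv track=rewrite | github.com/sergiorgiraldo/ai_for_the_win | labs/lab16b-ai-powered-threat-actors/solution/main.py | _generate_risk_recommendations
-- ===== SOURCE A (Python) =====
-- from typing import Dict, List, Optional, Set
--
-- def _generate_risk_recommendations(risk_factors: List[str]) -> List[str]:
--     """Generate recommendations based on risk factors."""
--     recommendations = []
--
--     if any("voice cloning" in f for f in risk_factors):
--         recommendations.append("Implement code word system for executive verification")
--
--     if any("awareness training" in f for f in risk_factors):
--         recommendations.append("Deploy AI threat awareness training program")
--
--     if any("email filtering" in f for f in risk_factors):
--         recommendations.append("Implement AI-based email security solution")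
--
--     if any("callback" in f for f in risk_factors):
--         recommendations.append(
--             "Establish mandatory callback verification for sensitive requests"
--         )
--
--     recommendations.append("Conduct AI threat tabletop exercises")
--     recommendations.append("Share threat intelligence with industry peers")
--
--     return recommendations
-- ===== SOURCE B (Python) =====
-- def _generate_risk_recommendations(risk_factors):
--     """Generate recommendations based on risk factors (single pass over the list)."""
--     voice = training = filtering = callback = False
--     for f in risk_factors:
--         voice = voice or ("voice cloning" in f)
--         training = training or ("awareness training" in f)
--         filtering = filtering or ("email filtering" in f)
--         callback = callback or ("callback" in f)
--     recommendations = []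
--     if voice:
--         recommendations.append("Implement code word system for executive verification")
--     if training:
--         recommendations.append("Deploy AI threat awareness training program")
--     if filtering:
--         recommendations.append("Implement AI-based email security solution")
--     if callback:
--         recommendations.append(
--             "Establish mandatory callback verification for sensitive requests"
--         )
--     recommendations.append("Conduct AI threat tabletop exercises")
--     recommendations.append("Share threat intelligence with industry peers")
--     return recommendations
-- ===== Notes on version B (the rewrite author's own statement) =====
-- stated objective: alternative
-- what changed: B replaces A's four separate any(...) scans of risk_factors with one pass that accumulates four boolean flags, then emits the recommendations from the flags.
import Mathlib
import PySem

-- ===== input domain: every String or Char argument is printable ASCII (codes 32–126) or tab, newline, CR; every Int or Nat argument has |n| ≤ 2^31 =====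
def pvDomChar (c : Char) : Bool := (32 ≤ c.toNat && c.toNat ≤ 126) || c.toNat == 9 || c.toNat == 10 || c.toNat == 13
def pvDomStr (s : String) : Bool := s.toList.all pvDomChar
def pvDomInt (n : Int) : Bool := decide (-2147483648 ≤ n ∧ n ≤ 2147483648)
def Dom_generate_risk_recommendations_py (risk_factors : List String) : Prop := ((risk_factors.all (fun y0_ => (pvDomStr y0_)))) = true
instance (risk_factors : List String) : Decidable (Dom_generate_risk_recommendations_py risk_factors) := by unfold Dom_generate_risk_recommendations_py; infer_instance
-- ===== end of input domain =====

-- B replaces A's four separate any(...) scans with one pass accumulating four boolean flags (alternative decomposition, same cost class).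


-- ===== PORT A =====
def generate_risk_recommendations_py (risk_factors : List String) : List String :=
  let recommendations : List String := []
  let recommendations :=
    if risk_factors.any (fun f => PySem.Str.isIn "voice cloning" f) then
      recommendations ++ ["Implement code word system for executive verification"]
    else recommendations
  let recommendations :=
    if risk_factors.any (fun f => PySem.Str.isIn "awareness training" f) then
      recommendations ++ ["Deploy AI threat awareness training program"]
    else recommendations
  let recommendations :=
    if risk_factors.any (fun f => PySem.Str.isIn "email filtering" f) then
      recommendations ++ ["Implement AI-based email security solution"]
    else recommendations
  let recommendations :=
    if risk_factors.any (fun f => PySem.Str.isIn "callback" f) then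
      recommendations ++ ["Establish mandatory callback verification for sensitive requests"]
    else recommendations
  let recommendations := recommendations ++ ["Conduct AI threat tabletop exercises"]
  let recommendations := recommendations ++ ["Share threat intelligence with industry peers"]
  recommendations

-- ===== PORT B =====
-- single pass: four boolean flags accumulated in one fold over risk_factors
def generate_risk_recommendations_py_alt (risk_factors : List String) : List String :=
  let flags := risk_factors.foldl
    (fun (st : Bool × Bool × Bool × Bool) f =>
      (st.1 || PySem.Str.isIn "voice cloning" f,
       st.2.1 || PySem.Str.isIn "awareness training" f,
       st.2.2.1 || PySem.Str.isIn "email filtering" f,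
       st.2.2.2 || PySem.Str.isIn "callback" f))
    (false, false, false, false)
  let recommendations : List String := []
  let recommendations := if flags.1 then recommendations ++ ["Implement code word system for executive verification"] else recommendations
  let recommendations := if flags.2.1 then recommendations ++ ["Deploy AI threat awareness training program"] else recommendations
  let recommendations := if flags.2.2.1 then recommendations ++ ["Implement AI-based email security solution"] else recommendations
  let recommendations := if flags.2.2.2 then recommendations ++ ["Establish mandatory callback verification for sensitive requests"] else recommendations
  let recommendations := recommendations ++ ["Conduct AI threat tabletop exercises"]
  recommendations ++ ["Share threat intelligence with industry peers"]

-- ===== PRECONDITION & SPEC =====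
def Spec_generate_risk_recommendations_py (risk_factors : List String) (out : List String) : Prop := out = generate_risk_recommendations_py_alt risk_factors
instance (risk_factors : List String) (out : List String) : Decidable (Spec_generate_risk_recommendations_py risk_factors out) := by unfold Spec_generate_risk_recommendations_py; infer_instance

-- ===== CLAIM (what is proved, stated in full; the proofs are below) =====
def Claim_equal_generate_risk_recommendations_py : Prop := ∀ (risk_factors : List String), Dom_generate_risk_recommendations_py risk_factors → Spec_generate_risk_recommendations_py risk_factors (generate_risk_recommendations_py risk_factors)

-- ===== LEMMAS AND PROOFS =====

-- the four-flag fold computes exactly the four any-scans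
theorem flags_fold_eq (p1 p2 p3 p4 : String → Bool) (l : List String) (a b c d : Bool) :
    l.foldl
      (fun (st : Bool × Bool × Bool × Bool) f =>
        (st.1 || p1 f, st.2.1 || p2 f, st.2.2.1 || p3 f, st.2.2.2 || p4 f))
      (a, b, c, d)
    = (a || l.any p1, b || l.any p2, c || l.any p3, d || l.any p4) := by
  induction l generalizing a b c d with
  | nil => simp
  | cons x xs ih =>
      simp [List.foldl, ih, Bool.or_assoc]

-- ===== VERDICT (by name: the statement is the Claim_ definition above) =====
theorem generate_risk_recommendations_py_spec : Claim_equal_generate_risk_recommendations_py := by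
  intro risk_factors _
  unfold Spec_generate_risk_recommendations_py generate_risk_recommendations_py generate_risk_recommendations_py_alt
  rw [flags_fold_eq]
  simp
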